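-- pv_equiv track=rewrite | github.com/MuffinC/Leetcodestore | python/Codesignal/build pali.py | solution
-- ===== SOURCE A (Python) =====
-- def solution(st):
--     ans = 0
--     while True:
--         com = st[::-1]
--         letter = 0
--         for x in range(len(com)):
--             if com[x] == '*' or com[x] == st[x] or st[x] == '*':
--                 letter += 1
--             else:
--                 break
--         if letter == len(com): return ans
--
--         ans += 1
--         st = st + '*'
--
--     return ans
-- ===== SOURCE B (Python) =====
-- def _pal(st, i, j):
--     while i < j:
--         if not (st[i] == st[j] or st[i] == '*' or st[j] == '*'):
--             return False
--         i += 1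
--         j -= 1
--     return True
--
--
-- def solution(st):
--     n = len(st)
--     for k in range(n + 1):
--         if _pal(st, k, n - 1):
--             return k
-- ===== Notes on version B (the rewrite author's own statement) =====
-- stated objective: faster
-- what changed: B never builds strings: instead of repeatedly appending a wildcard, reversing the string and counting a matching prefix each round, it checks each suffix st[k:] in place with a two-pointer wildcard-palindrome test and returns the first k that passes.
import Mathlib
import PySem

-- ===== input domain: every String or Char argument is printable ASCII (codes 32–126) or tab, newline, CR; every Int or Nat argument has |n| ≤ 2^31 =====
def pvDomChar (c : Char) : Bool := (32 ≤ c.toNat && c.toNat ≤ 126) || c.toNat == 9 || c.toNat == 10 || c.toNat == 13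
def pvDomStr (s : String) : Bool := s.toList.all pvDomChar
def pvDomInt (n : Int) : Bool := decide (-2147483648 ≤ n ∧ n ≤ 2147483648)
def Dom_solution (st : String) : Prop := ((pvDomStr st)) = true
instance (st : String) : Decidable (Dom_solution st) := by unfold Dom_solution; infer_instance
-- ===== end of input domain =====

-- B avoids A's per-round string reversal and '*'-appending by two-pointer checking suffixes in place (objective: faster — measured; same worst-case class).

-- ===== PORT A =====
-- the wildcard comparison from A's `if com[x] == '*' or com[x] == st[x] or st[x] == '*'`
def wcA (c s : Char) : Bool := c == '*' || c == s || s == '*'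

-- A's inner for-loop: count matching positions left-to-right, stop at first mismatch (break)
def countPref : List Char → List Char → Nat
  | c :: cs, s :: ss => if wcA c s then 1 + countPref cs ss else 0
  | _, _ => 0

-- A's `while True` loop (com = st[::-1] inlined); fuel only makes it total — n+1 rounds always suffice
def loopA : Nat → List Char → Int → Int
  | 0, _, ans => ans
  | fuel + 1, st, ans =>
    if countPref st.reverse st = st.reverse.length then ans
    else loopA fuel (st ++ ['*']) (ans + 1)

def solution (st : String) : Int := loopA (st.toList.length + 1) st.toList 0

-- ===== PORT B =====
-- Source B's wildcard test st[i] == st[j] or st[i] == '*' or st[j] == '*'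
def wcB (a b : Char) : Bool := a == b || a == '*' || b == '*'

-- Source B's _pal: two-pointer while-loop on indices
def palB (s : List Char) (i j : Nat) : Bool :=
  if i < j then
    if wcB (s.getD i ' ') (s.getD j ' ') then palB s (i + 1) (j - 1) else false
  else true
termination_by j - i

def solution_alt (st : String) : Int :=
  let s := st.toList
  let n := s.length
  match (List.range (n + 1)).find? (fun k => palB s k (n - 1)) with
  | some k => (k : Int)
  | none => (n : Int)

-- ===== PRECONDITION & SPEC =====
def Spec_solution (st : String) (out : Int) : Prop := out = solution_alt st
instance (st : String) (out : Int) : Decidable (Spec_solution st out) := by unfold Spec_solution; infer_instance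

-- ===== CLAIM (what is proved, stated in full; the proofs are below) =====
def Claim_equal_solution : Prop := ∀ (st : String), Dom_solution st → Spec_solution st (solution st)

-- ===== LEMMAS AND PROOFS =====

theorem wcB_star_right (a : Char) : wcB a '*' = true := by simp [wcB]
theorem wcB_star_left (a : Char) : wcB '*' a = true := by simp [wcB]
theorem wcB_refl (a : Char) : wcB a a = true := by simp [wcB]

theorem wcB_comm (a b : Char) : wcB a b = wcB b a := by
  unfold wcB; rw [show (a == b) = (b == a) from Bool.beq_comm]; ac_rfl

theorem wcA_eq_wcB (c s : Char) : wcA c s = wcB s c := by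
  unfold wcA wcB; rw [show (c == s) = (s == c) from Bool.beq_comm]; ac_rfl

-- characterization of A's inner loop: full count iff every position matches
theorem countPref_iff (l1 : List Char) : ∀ l2 : List Char, l1.length = l2.length →
    (countPref l1 l2 = l1.length ↔
      ∀ i, i < l1.length → wcA (l1.getD i ' ') (l2.getD i ' ') = true) := by
  induction l1 with
  | nil => intro l2 _; simp [countPref]
  | cons a as ih =>
    intro l2 hlen
    cases l2 with
    | nil => simp at hlen
    | cons b bs =>
      simp only [List.length_cons] at hlen
      have hlen' : as.length = bs.length := by omega
      constructor
      · intro h i hi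
        by_cases hw : wcA a b
        · have htail : countPref as bs = as.length := by
            simp only [countPref, hw, if_true, List.length_cons] at h
            omega
          cases i with
          | zero => simpa using hw
          | succ i =>
            have := (ih bs hlen').mp htail i (by simpa using hi)
            simpa using this
        · simp [countPref, hw] at h
      · intro h
        have hw : wcA a b = true := by simpa using h 0 (by simp)
        have htail : countPref as bs = as.length := by
          refine (ih bs hlen').mpr ?_
          intro i hi
          have := h (i + 1) (by simpa using hi)
          simpa using this
        simp only [countPref, hw, if_true, htail, List.length_cons]
        omega

-- characterization of B's two-pointer loop as a ∀ over index pairs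
theorem palB_iff_aux (s : List Char) : ∀ d i j : Nat, j - i ≤ d →
    (palB s i j = true ↔
      ∀ p q, i ≤ p → p < q → q ≤ j → p + q = i + j → wcB (s.getD p ' ') (s.getD q ' ') = true) := by
  intro d
  induction d with
  | zero =>
    intro i j hd
    rw [palB]
    simp only [show ¬ i < j by omega, if_false, true_iff]
    intro p q hip hpq hqj hsum; omega
  | succ d ih =>
    intro i j hd
    by_cases hij : i < j
    · rw [palB]
      simp only [hij, if_true]
      by_cases hw : wcB (s.getD i ' ') (s.getD j ' ') = true
      · simp only [hw, if_true]
        rw [ih (i + 1) (j - 1) (by omega)]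
        constructor
        · intro hrest p q hip hpq hqj hsum
          by_cases hp : p = i
          · have hq : q = j := by omega
            subst hp hq; exact hw
          · exact hrest p q (by omega) hpq (by omega) (by omega)
        · intro hall p q hip hpq hqj hsum
          exact hall p q (by omega) hpq (by omega) (by omega)
      · simp only [hw, if_false, Bool.false_eq_true, false_iff]
        intro hall
        exact hw (hall i j le_rfl hij le_rfl rfl)
    · rw [palB]
      simp only [hij, if_false, true_iff]
      intro p q hip hpq hqj hsum; omega

theorem palB_iff (s : List Char) (i j : Nat) :
    palB s i j = true ↔
      ∀ p q, i ≤ p → p < q → q ≤ j → p + q = i + j → wcB (s.getD p ' ') (s.getD q ' ') = true :=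
  palB_iff_aux s (j - i) i j le_rfl

-- the suffix predicate both programs decide at round k
def Pal (s : List Char) (k : Nat) : Prop :=
  ∀ p q, p < q → q < s.length → p + q + 1 = k + s.length → wcB (s.getD p ' ') (s.getD q ' ') = true

theorem palB_eq_Pal (s : List Char) (k : Nat) :
    palB s k (s.length - 1) = true ↔ Pal s k := by
  rw [palB_iff]
  unfold Pal
  constructor
  · intro h p q hpq hq hsum
    exact h p q (by omega) hpq (by omega) (by omega)
  · intro h p q hkp hpq hq hsum
    exact h p q hpq (by omega) (by omega)

theorem Pal_length (s : List Char) : Pal s s.length := by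
  intro p q hpq hq hsum; omega

-- getD of s ++ replicate k '*'
theorem getD_pad (s : List Char) (k i : Nat) (hi : i < s.length + k) :
    (s ++ List.replicate k '*').getD i ' ' =
      if i < s.length then s.getD i ' ' else '*' := by
  rw [List.getD_eq_getElem?_getD]
  by_cases h : i < s.length
  · rw [List.getElem?_append_left h, if_pos h, List.getD_eq_getElem?_getD]
  · rw [List.getElem?_append_right (by omega), if_neg h, List.getElem?_replicate]
    simp [show i - s.length < k by omega]

-- A's round-k test equals Pal s k
theorem check_eq_Pal (s : List Char) (k : Nat) :
    (countPref (s ++ List.replicate k '*').reverse (s ++ List.replicate k '*') =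
        (s ++ List.replicate k '*').reverse.length) ↔ Pal s k := by
  set cur := s ++ List.replicate k '*' with hcur
  have hm : cur.length = s.length + k := by simp [hcur]
  have hrl : cur.reverse.length = cur.length := by simp
  rw [countPref_iff _ _ (by simp)]
  have hrev : ∀ i, i < cur.length →
      cur.reverse.getD i ' ' = cur.getD (cur.length - 1 - i) ' ' := by
    intro i hi
    rw [List.getD_eq_getElem?_getD, List.getD_eq_getElem?_getD, List.getElem?_reverse hi]
  constructor
  · intro h p q hpq hq hsum
    have hx : q < cur.reverse.length := by omega
    have := h q hx
    rw [hrev q (by omega)] at this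
    have hpi : cur.length - 1 - q = p := by omega
    rw [hpi] at this
    rw [getD_pad s k p (by omega), getD_pad s k q (by omega)] at this
    simp only [show p < s.length by omega, if_true, hq, if_true] at this
    rw [wcA_eq_wcB] at this
    rwa [wcB_comm]
  · intro h i hi
    rw [hrl] at hi
    rw [hrev i hi, wcA_eq_wcB]
    set y := cur.length - 1 - i with hy
    rw [getD_pad s k i (by omega), getD_pad s k y (by omega)]
    by_cases hiN : i < s.length
    · by_cases hyN : y < s.length
      · simp only [hiN, if_true, hyN, if_true]
        rcases Nat.lt_trichotomy i y with hlt | heq | hgt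
        · exact h i y hlt hyN (by omega)
        · rw [heq]; exact wcB_refl _
        · rw [wcB_comm]; exact h y i hgt hiN (by omega)
      · simp [hiN, hyN, wcB_star_right]
    · simp [hiN, wcB_star_left]

-- A's outer loop computes the first k (from the current round on) satisfying the check
theorem loopA_eq_find (s : List Char) : ∀ m k : Nat, k ≤ s.length → k + m = s.length + 1 →
    loopA m (s ++ List.replicate k '*') (k : Int) =
      (((List.range' k m).find? (fun j => palB s j (s.length - 1))).getD 0 : Nat) := by
  intro m
  induction m with
  | zero => intro k hk hm; omega
  | succ m ih =>
    intro k hk hm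
    rw [List.range'_succ]
    simp only [loopA]
    by_cases hpal : palB s k (s.length - 1) = true
    · have hchk : countPref (s ++ List.replicate k '*').reverse (s ++ List.replicate k '*') =
          (s ++ List.replicate k '*').reverse.length :=
        (check_eq_Pal s k).mpr ((palB_eq_Pal s k).mp hpal)
      rw [if_pos hchk]
      simp [List.find?, hpal]
    · have hchk : ¬ (countPref (s ++ List.replicate k '*').reverse (s ++ List.replicate k '*') =
          (s ++ List.replicate k '*').reverse.length) := by
        intro h
        exact hpal ((palB_eq_Pal s k).mpr ((check_eq_Pal s k).mp h))
      have hkn : k < s.length := by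
        rcases Nat.lt_or_ge k s.length with h | h
        · exact h
        · exfalso
          have hkeq : k = s.length := by omega
          exact hpal ((palB_eq_Pal s k).mpr (hkeq ▸ Pal_length s))
      have hstep : (s ++ List.replicate k '*') ++ ['*'] = s ++ List.replicate (k + 1) '*' := by
        rw [List.append_assoc]
        congr 1
        rw [List.replicate_succ']
      rw [if_neg hchk, hstep,
        show ((k : Int) + 1) = ((k + 1 : Nat) : Int) by push_cast; ring,
        ih (k + 1) (by omega) (by omega)]
      simp [List.find?, hpal]

theorem find?_range_isSome (s : List Char) :
    ((List.range (s.length + 1)).find? (fun j => palB s j (s.length - 1))).isSome := by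
  rw [List.find?_isSome]
  exact ⟨s.length, by simp, (palB_eq_Pal s s.length).mpr (Pal_length s)⟩

-- ===== VERDICT (by name: the statement is the Claim_ definition above) =====
theorem solution_spec : Claim_equal_solution := by
  intro st _
  show solution st = solution_alt st
  unfold solution solution_alt
  have h0 : st.toList ++ List.replicate 0 '*' = st.toList := by simp
  have hloop := loopA_eq_find st.toList (st.toList.length + 1) 0 (by omega) (by omega)
  rw [h0] at hloop
  rw [show (0 : Int) = ((0 : Nat) : Int) from rfl, hloop,
    show List.range' 0 (st.toList.length + 1) = List.range (st.toList.length + 1) from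
      List.range_eq_range'.symm]
  dsimp only
  rcases Option.isSome_iff_exists.mp (find?_range_isSome st.toList) with ⟨k, hk⟩
  rw [hk]
  rfl
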